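-- pv_equiv track=rewrite | github.com/kishore270598/problem-solving | array_problem.py | required_sum_pairs
-- ===== SOURCE A (Python) =====
-- def required_sum_pairs(a,n,b,m,k):
--     #sort first array since the requirment is (u1,v1) ,(u2,v2) u1<u2
--     #once its sorted put the second array in set ..
--     #using while loop traverse array till n subtract first i element with the sum and check that remaning is avalible in set
--     #if i that the case append it into a list with the arr[i], the sum
--     i=0
--     required_pair=[]
--     s_a=sorted(a)
--     b2=set()
--     for j in b:
--         b2.add(j)
--     while(i<len(a)):
--         to_search=k-s_a[i]
--         if to_search in b2:
--             required_pair.append([s_a[i],to_search])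
--         i+=1
--     return required_pair
-- ===== SOURCE B (Python) =====
-- def required_sum_pairs(a, n, b, m, k):
--     # Two-pointer merge over both sorted arrays instead of a hash set:
--     # as x increases over sorted(a), the complement k-x decreases, so a single
--     # pointer j descends through sorted(b) once across the whole pass.
--     sa = sorted(a)
--     sb = sorted(b)
--     j = len(sb) - 1
--     out = []
--     for x in sa:
--         t = k - x
--         while j >= 0 and sb[j] > t:
--             j -= 1
--         if j >= 0 and sb[j] == t:
--             out.append([x, t])
--     return out
-- ===== Notes on version B (the rewrite author's own statement) =====
-- stated objective: alternative
-- what changed: Replaced the hash-set membership test over b by sorting b as well and running a single descending two-pointer merge against sorted(a), so no set is built and each array is scanned once after sorting.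
import Mathlib
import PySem

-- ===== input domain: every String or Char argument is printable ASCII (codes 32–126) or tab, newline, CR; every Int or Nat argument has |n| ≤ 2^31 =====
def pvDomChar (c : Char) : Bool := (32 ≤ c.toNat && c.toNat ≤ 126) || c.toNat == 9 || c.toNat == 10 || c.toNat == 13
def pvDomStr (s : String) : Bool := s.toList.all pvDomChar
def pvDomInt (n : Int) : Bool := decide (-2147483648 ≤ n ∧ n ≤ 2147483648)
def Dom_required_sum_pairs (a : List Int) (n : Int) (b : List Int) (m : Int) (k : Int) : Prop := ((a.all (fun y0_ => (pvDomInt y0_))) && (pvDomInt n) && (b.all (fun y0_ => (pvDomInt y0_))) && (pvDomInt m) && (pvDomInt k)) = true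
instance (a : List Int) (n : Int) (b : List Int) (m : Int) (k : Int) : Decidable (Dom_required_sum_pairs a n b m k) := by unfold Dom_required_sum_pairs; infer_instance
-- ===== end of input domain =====

-- B replaces A's hash-set membership test by a two-pointer merge over both sorted arrays (alternative algorithm, similar cost).

-- ===== PORT A =====
-- the while loop: i runs from 0 while i < len(a), reading s_a[i]
def rspWhileA (sa : List Int) (la : Nat) (b2 : PySem.Set Int) (k : Int) (i : Nat)
    (acc : List (List Int)) : List (List Int) :=
  if i < la then
    let to_search := k - (PySem.List.pyGet? sa (i : Int)).getD 0
    rspWhileA sa la b2 k (i + 1)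
      (if PySem.Set.contains b2 to_search then acc ++ [[(PySem.List.pyGet? sa (i : Int)).getD 0, to_search]] else acc)
  else acc
termination_by la - i

def required_sum_pairs (a : List Int) (n : Int) (b : List Int) (m : Int) (k : Int) : List (List Int) :=
  let s_a := PySem.List.sorted a (fun x => x) false
  let b2 := b.foldl (fun s j => PySem.Set.add s j) PySem.Set.empty
  rspWhileA s_a a.length b2 k 0 []

-- ===== PORT B =====
-- the inner while: j -= 1 while j >= 0 and sb[j] > t
def rspDescend (sb : List Int) (t : Int) (j : Int) : Int :=
  if 0 ≤ j ∧ t < (PySem.List.pyGet? sb j).getD 0 then rspDescend sb t (j - 1) else j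
termination_by (j + 1).toNat
decreasing_by omega

-- the for loop over sorted(a), threading pointer j and the output list
def rspSweep (sb : List Int) (k : Int) : List Int → Int → List (List Int) → List (List Int)
  | [], _, acc => acc
  | x :: rest, j, acc =>
    let t := k - x
    let j' := rspDescend sb t j
    rspSweep sb k rest j'
      (if 0 ≤ j' ∧ (PySem.List.pyGet? sb j').getD 0 = t then acc ++ [[x, t]] else acc)

def required_sum_pairs_alt (a : List Int) (n : Int) (b : List Int) (m : Int) (k : Int) : List (List Int) :=
  let sa := PySem.List.sorted a (fun x => x) false
  let sb := PySem.List.sorted b (fun x => x) false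
  rspSweep sb k sa ((sb.length : Int) - 1) []

-- ===== PRECONDITION & SPEC =====
def Spec_required_sum_pairs (a : List Int) (n : Int) (b : List Int) (m : Int) (k : Int) (out : List (List Int)) : Prop := out = required_sum_pairs_alt a n b m k
instance (a : List Int) (n : Int) (b : List Int) (m : Int) (k : Int) (out : List (List Int)) : Decidable (Spec_required_sum_pairs a n b m k out) := by unfold Spec_required_sum_pairs; infer_instance

-- ===== CLAIM (what is proved, stated in full; the proofs are below) =====
def Claim_equal_required_sum_pairs : Prop := ∀ (a : List Int) (n : Int) (b : List Int) (m : Int) (k : Int), Dom_required_sum_pairs a n b m k → Spec_required_sum_pairs a n b m k (required_sum_pairs a n b m k)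

-- ===== LEMMAS AND PROOFS =====

-- the common reference form both loops reduce to
def rspRef (sb : List Int) (k : Int) (l : List Int) (acc : List (List Int)) : List (List Int) :=
  l.foldl (fun acc x => if (k - x) ∈ sb then acc ++ [[x, k - x]] else acc) acc

theorem rspWhileA_eq_ref (sa sbm b2 : List Int) (k : Int)
    (hmem : ∀ t : Int, PySem.Set.contains b2 t = true ↔ t ∈ sbm) :
    ∀ (i : Nat) (acc : List (List Int)), i ≤ sa.length →
      rspWhileA sa sa.length b2 k i acc = rspRef sbm k (sa.drop i) acc := by
  intro i acc hle
  fun_induction rspWhileA sa sa.length b2 k i acc with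
  | case1 i acc hlt ts ih =>
    have hg : (PySem.List.pyGet? sa (i : Int)).getD 0 = sa[i] := by
      simp [PySem.List.pyGet?_natCast, List.getElem?_eq_getElem hlt]
    have hts : ts = k - sa[i] := by
      show k - (PySem.List.pyGet? sa (i : Int)).getD 0 = k - sa[i]
      rw [hg]
    have hd : sa.drop i = sa[i] :: sa.drop (i+1) := List.drop_eq_getElem_cons hlt
    rw [hd]
    unfold rspRef
    simp only [List.foldl_cons]
    rw [← rspRef]
    specialize ih (by omega)
    by_cases hm : (k - sa[i]) ∈ sbm
    · have hb2 : k - sa[i] ∈ b2 := by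
        have := (hmem _).mpr hm; simpa [hts] using this
      simp only [hts, hg] at ih ⊢
      simp only [PySem.Set.contains] at ih ⊢
      simp [hb2, hm] at ih ⊢
      exact ih
    · have hb2 : k - sa[i] ∉ b2 := by
        intro h; apply hm
        refine (hmem _).mp ?_
        simpa [hts] using h
      simp only [hts, hg] at ih ⊢
      simp only [PySem.Set.contains] at ih ⊢
      simp [hb2, hm] at ih ⊢
      exact ih
  | case2 i acc hnlt =>
    have : i = sa.length := by omega
    subst this
    simp [rspRef]

theorem rspDescend_spec (sb : List Int) (t j : Int)
    (hlen : j < (sb.length : Int))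
    (habove : ∀ i : Nat, j < (i : Int) → (h : i < sb.length) → t < sb[i]) :
    rspDescend sb t j ≤ j ∧
    (∀ i : Nat, rspDescend sb t j < (i : Int) → (h : i < sb.length) → t < sb[i]) ∧
    (0 ≤ rspDescend sb t j → ∀ h : (rspDescend sb t j).toNat < sb.length, sb[(rspDescend sb t j).toNat] ≤ t) := by
  fun_induction rspDescend sb t j with
  | case1 j hcond ih =>
    obtain ⟨hj0, hgt⟩ := hcond
    have hjlt : j.toNat < sb.length := by omega
    have hget : (PySem.List.pyGet? sb j).getD 0 = sb[j.toNat] := by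
      rw [PySem.List.pyGet?_of_nonneg sb hj0, List.getElem?_eq_getElem hjlt]
      rfl
    have habove' : ∀ i : Nat, j - 1 < (i : Int) → (h : i < sb.length) → t < sb[i] := by
      intro i hi h
      by_cases hij : j < (i : Int)
      · exact habove i hij h
      · have : (i : Int) = j := by omega
        have : i = j.toNat := by omega
        subst this
        rw [← hget]; exact hgt
    have := ih (by omega) habove'
    exact ⟨by omega, this.2.1, this.2.2⟩
  | case2 j hcond =>
    refine ⟨le_refl _, habove, ?_⟩
    intro hj0 h
    have hget : (PySem.List.pyGet? sb j).getD 0 = sb[j.toNat] := by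
      rw [PySem.List.pyGet?_of_nonneg sb hj0, List.getElem?_eq_getElem h]
      rfl
    have : ¬ t < (PySem.List.pyGet? sb j).getD 0 := by tauto
    rw [hget] at this
    omega

theorem rspSweep_eq_ref (sb : List Int) (k : Int)
    (hsorted : sb.Pairwise (· ≤ ·)) :
    ∀ (l : List Int) (j : Int) (acc : List (List Int)),
      l.Pairwise (· ≤ ·) → j < (sb.length : Int) →
      (∀ x ∈ l, ∀ i : Nat, j < (i : Int) → (h : i < sb.length) → (k - x) < sb[i]) →
      rspSweep sb k l j acc = rspRef sb k l acc := by
  intro l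
  induction l with
  | nil => intro j acc _ _ _; simp [rspSweep, rspRef]
  | cons x rest ih =>
    intro j acc hpair hjlen hinv
    have hab : ∀ i : Nat, j < (i : Int) → (h : i < sb.length) → (k - x) < sb[i] :=
      hinv x (List.mem_cons_self)
    obtain ⟨h1, h2, h3⟩ := rspDescend_spec sb (k - x) j hjlen hab
    have hj'len : rspDescend sb (k - x) j < (sb.length : Int) := by omega
    have hxle : ∀ y ∈ rest, x ≤ y := (List.pairwise_cons.mp hpair).1
    have hinv' : ∀ y ∈ rest, ∀ i : Nat, rspDescend sb (k - x) j < (i : Int) →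
        (h : i < sb.length) → (k - y) < sb[i] := by
      intro y hy i hi h
      have := h2 i hi h
      have := hxle y hy
      omega
    have hmemc : (0 ≤ rspDescend sb (k - x) j ∧
        (PySem.List.pyGet? sb (rspDescend sb (k - x) j)).getD 0 = k - x) ↔ (k - x) ∈ sb := by
      set j' := rspDescend sb (k - x) j with hj'
      constructor
      · rintro ⟨hj0, heq⟩
        have hlt : j'.toNat < sb.length := by omega
        rw [PySem.List.pyGet?_of_nonneg sb hj0, List.getElem?_eq_getElem hlt] at heq
        simp only [Option.getD_some] at heq
        rw [← heq]
        exact List.getElem_mem hlt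
      · intro hm
        obtain ⟨i, hi, hieq⟩ := List.mem_iff_getElem.mp hm
        by_cases hij : j' < (i : Int)
        · have := h2 i hij hi
          omega
        · have hj0 : 0 ≤ j' := by omega
          have hlt : j'.toNat < sb.length := by omega
          refine ⟨hj0, ?_⟩
          rw [PySem.List.pyGet?_of_nonneg sb hj0, List.getElem?_eq_getElem hlt]
          simp only [Option.getD_some]
          rcases Nat.lt_or_ge i j'.toNat with hlt2 | hge
          · have hle1 : sb[i] ≤ sb[j'.toNat] :=
              List.pairwise_iff_getElem.mp hsorted i j'.toNat hi hlt hlt2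
            have hle2 : sb[j'.toNat] ≤ k - x := h3 hj0 hlt
            omega
          · have : i = j'.toNat := by omega
            subst this
            exact hieq
    simp only [rspSweep]
    rw [ih _ _ ((List.pairwise_cons.mp hpair).2) hj'len hinv']
    unfold rspRef
    simp only [List.foldl_cons]
    by_cases hm : (k - x) ∈ sb
    · have := hmemc.mpr hm
      simp [this.1, this.2, hm]
    · have hnc : ¬ (0 ≤ rspDescend sb (k - x) j ∧
          (PySem.List.pyGet? sb (rspDescend sb (k - x) j)).getD 0 = k - x) := fun h => hm (hmemc.mp h)
      simp [hnc, hm]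

-- ===== VERDICT (by name: the statement is the Claim_ definition above) =====
theorem required_sum_pairs_spec : Claim_equal_required_sum_pairs := by
  intro a n b m k _
  unfold Spec_required_sum_pairs required_sum_pairs required_sum_pairs_alt
  have hsalen : (PySem.List.sorted a (fun x => x) false).length = a.length :=
    PySem.List.length_sorted a (fun x => x) false
  have hmem : ∀ t : Int,
      PySem.Set.contains (b.foldl (fun s j => PySem.Set.add s j) PySem.Set.empty) t = true ↔
      t ∈ PySem.List.sorted b (fun x => x) false := by
    intro t
    rw [show b.foldl (fun s j => PySem.Set.add s j) PySem.Set.empty = PySem.Set.ofList b from rfl]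
    simp [PySem.Set.contains, PySem.Set.mem_ofList, PySem.List.mem_sorted]
  rw [show a.length = (PySem.List.sorted a (fun x => x) false).length from hsalen.symm]
  rw [rspWhileA_eq_ref _ (PySem.List.sorted b (fun x => x) false) _ k hmem 0 [] (Nat.zero_le _)]
  rw [List.drop_zero]
  rw [rspSweep_eq_ref _ k (PySem.List.sorted_pairwise b (fun x => x))
      _ _ _ (PySem.List.sorted_pairwise a (fun x => x)) (by omega) ?_]
  intro x hx i hi h
  omega
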